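-- pv_equiv track=rewrite | github.com/981377660LMT/algorithm-study | 22_专题/子数组经典模型/3_统计和为正数的子数组有多少个.py | subarraysWithMoreZerosThanOnes2
-- ===== SOURCE A (Python) =====
-- from collections import defaultdict
-- from typing import List
--
-- MOD = int(1e9 + 7)
--
-- def subarraysWithMoreZerosThanOnes2(nums: List[int]) -> int:
--     """和为正数的子数组有多少个
--
--     O(n) dp解法
--     每次需要查询小于当前值的个数，但是查询值每次变化都是+1或者-1,
--     所以可以使用一个额外的变量来记录,查询复杂度O(logn)变为O(1)
--     """
--
--     counter = defaultdict(int, {0: 1})  # 以前一个元素结尾的前缀和为key的子数组个数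
--
--     res, curSum, leftSmaller = 0, 0, 0
--     for num in nums:
--         if num == 1:
--             curSum += 1
--             leftSmaller += counter[curSum - 1]  # 之前前缀和等于curSum的子数组都可以累加
--         else:
--             curSum -= 1
--             leftSmaller -= counter[curSum]  # 之前前缀和等于curSum的子数组不能要了
--
--         counter[curSum] += 1
--         res = (res + leftSmaller) % MOD
--
--     return res
-- ===== SOURCE B (Python) =====
-- MOD = int(1e9 + 7)
--
-- def subarraysWithMoreZerosThanOnes2(nums):
--     """Count pairs i < j with prefix[i] < prefix[j] directly over the prefix-sum
--     array (step +1 for a 1, -1 otherwise), taking MOD once at the end."""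
--     prefix = [0]
--     cur = 0
--     for num in nums:
--         cur += 1 if num == 1 else -1
--         prefix.append(cur)
--     total = 0
--     seen = []
--     for p in prefix:
--         total += sum(1 for q in seen if q < p)
--         seen.append(p)
--     return total % MOD
-- ===== Notes on version B (the rewrite author's own statement) =====
-- stated objective: simpler
-- what changed: Replaces the incremental counter-dict/leftSmaller bookkeeping with an explicit prefix-sum array and a direct count of pairs i<j with prefix[i]<prefix[j], applying MOD once at the end instead of every step.
import Mathlib
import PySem

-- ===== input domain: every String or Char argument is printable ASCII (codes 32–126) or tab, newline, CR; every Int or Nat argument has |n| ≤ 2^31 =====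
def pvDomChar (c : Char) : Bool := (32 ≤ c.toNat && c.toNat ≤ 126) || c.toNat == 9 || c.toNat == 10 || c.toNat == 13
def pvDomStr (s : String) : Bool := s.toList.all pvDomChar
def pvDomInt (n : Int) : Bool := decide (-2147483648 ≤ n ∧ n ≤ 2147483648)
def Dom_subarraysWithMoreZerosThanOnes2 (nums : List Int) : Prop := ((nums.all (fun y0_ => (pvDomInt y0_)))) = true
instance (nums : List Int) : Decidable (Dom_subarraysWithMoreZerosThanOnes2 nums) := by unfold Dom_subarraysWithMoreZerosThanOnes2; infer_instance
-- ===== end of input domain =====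

-- B replaces A's incremental counter-dict/leftSmaller bookkeeping by an explicit prefix array and a
-- direct strict-less pair count, taking MOD once at the end (objective: simpler).

-- ===== PORT A =====
-- Loop body of A. defaultdict reads are ported with getD (a defaultdict read inserts the key with
-- value 0, which no later getD-with-default-0 lookup can distinguish, so values are exact);
-- counter[curSum] += 1 is Dict.modify with default 0.
def pvStepA (st : Int × Int × Int × PySem.Dict Int Int) (num : Int) :
    Int × Int × Int × PySem.Dict Int Int :=
  let res := st.1
  let curSum := st.2.1
  let leftSmaller := st.2.2.1
  let counter := st.2.2.2
  let (curSum, leftSmaller) :=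
    if num == 1 then
      (curSum + 1, leftSmaller + counter.getD (curSum + 1 - 1) 0)
    else
      (curSum - 1, leftSmaller - counter.getD (curSum - 1) 0)
  let counter := counter.modify curSum 0 (· + 1)
  (PySem.Int.mod (res + leftSmaller) 1000000007, curSum, leftSmaller, counter)

def subarraysWithMoreZerosThanOnes2 (nums : List Int) : Int :=
  (nums.foldl pvStepA (0, 0, 0, (PySem.Dict.empty : PySem.Dict Int Int).insert 0 1)).1

-- ===== PORT B =====
-- first loop of Source B: build the prefix-sum list (state: prefix list, cur)
def pvStepB1 (pc : List Int × Int) (num : Int) : List Int × Int :=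
  let cur := pc.2 + (if num == 1 then 1 else -1)
  (pc.1 ++ [cur], cur)

-- second loop of Source B: count strict-less pairs (state: total, seen)
def pvStepB2 (ts : Int × List Int) (p : Int) : Int × List Int :=
  (ts.1 + ((ts.2.countP (fun q => q < p) : Nat) : Int), ts.2 ++ [p])

def subarraysWithMoreZerosThanOnes2_alt (nums : List Int) : Int :=
  let pref := (nums.foldl pvStepB1 ([0], 0)).1
  PySem.Int.mod (pref.foldl pvStepB2 (0, [])).1 1000000007

-- ===== PRECONDITION & SPEC =====
def Spec_subarraysWithMoreZerosThanOnes2 (nums : List Int) (out : Int) : Prop := out = subarraysWithMoreZerosThanOnes2_alt nums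
instance (nums : List Int) (out : Int) : Decidable (Spec_subarraysWithMoreZerosThanOnes2 nums out) := by unfold Spec_subarraysWithMoreZerosThanOnes2; infer_instance

-- ===== CLAIM (what is proved, stated in full; the proofs are below) =====
def Claim_equal_subarraysWithMoreZerosThanOnes2 : Prop := ∀ (nums : List Int), Dom_subarraysWithMoreZerosThanOnes2 nums → Spec_subarraysWithMoreZerosThanOnes2 nums (subarraysWithMoreZerosThanOnes2 nums)

-- ===== LEMMAS AND PROOFS =====

-- the prefix sums produced from value c by the remaining inputs
def pvScanFrom (c : Int) : List Int → List Int
  | [] => []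
  | num :: l => (c + (if num == 1 then 1 else -1)) :: pvScanFrom (c + (if num == 1 then 1 else -1)) l

-- strict-less pair count of the list l against the already-seen prefix values
def pvPairS (seen : List Int) : List Int → Int
  | [] => 0
  | p :: l => ((seen.countP (fun q => q < p) : Nat) : Int) + pvPairS (seen ++ [p]) l

theorem pvCountP_lt_succ (L : List Int) (c : Int) :
    L.countP (fun x => decide (x < c + 1)) = L.countP (fun x => decide (x < c)) + L.count c := by
  induction L with
  | nil => simp
  | cons x L ih =>
    simp only [List.countP_cons, List.count_cons, ih]
    by_cases h1 : x < c + 1 <;> by_cases h2 : x < c <;> by_cases h3 : x = c <;>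
      simp [h1, h2, h3] <;> omega

theorem pvB1_spec (l : List Int) : ∀ (pr : List Int) (c : Int),
    l.foldl pvStepB1 (pr, c) =
      (pr ++ pvScanFrom c l, l.foldl (fun c n => c + (if n == 1 then 1 else -1)) c) := by
  induction l with
  | nil => intro pr c; simp [pvScanFrom]
  | cons n l ih =>
    intro pr c
    simp only [List.foldl_cons, pvStepB1, pvScanFrom, ih]
    simp

theorem pvB2_spec (l : List Int) : ∀ (t : Int) (seen : List Int),
    (l.foldl pvStepB2 (t, seen)).1 = t + pvPairS seen l := by
  induction l with
  | nil => intro t seen; simp [pvPairS]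
  | cons p l ih =>
    intro t seen
    simp only [List.foldl_cons, pvStepB2, pvPairS, ih]
    ring

theorem pvCnt_update (cnt : PySem.Dict Int Int) (P : List Int) (c' : Int)
    (h : ∀ v : Int, cnt.getD v 0 = ((P.count v : Nat) : Int)) :
    ∀ v : Int, (cnt.modify c' 0 (· + 1)).getD v 0 = (((P ++ [c']).count v : Nat) : Int) := by
  intro v
  rw [PySem.Dict.getD_modify]
  by_cases hv : v = c'
  · subst hv
    rw [h]
    simp [List.count_append]
  · rw [if_neg hv, h]
    simp [List.count_append, List.count_singleton']
    exact fun h => hv h.symm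

theorem pvA_loop (l : List Int) : ∀ (Q : List Int) (c ls r : Int) (cnt : PySem.Dict Int Int),
    ls = ((Q.countP (fun x => decide (x < c)) : Nat) : Int) →
    (∀ v : Int, cnt.getD v 0 = (((Q ++ [c]).count v : Nat) : Int)) →
    PySem.Int.mod r 1000000007 = r →
    (l.foldl pvStepA (r, c, ls, cnt)).1 =
      PySem.Int.mod (r + pvPairS (Q ++ [c]) (pvScanFrom c l)) 1000000007 := by
  induction l with
  | nil =>
    intro Q c ls r cnt _ _ hr
    simpa [pvScanFrom, pvPairS] using hr.symm
  | cons num l ih =>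
    intro Q c ls r cnt hls hcnt hr
    by_cases hnum : num = 1
    · -- step +1
      have hls' : ls + cnt.getD (c + 1 - 1) 0 =
          (((Q ++ [c]).countP (fun x => decide (x < c + 1)) : Nat) : Int) := by
        have h1 := pvCountP_lt_succ (Q ++ [c]) c
        have h2 : (Q ++ [c]).countP (fun x => decide (x < c)) =
            Q.countP (fun x => decide (x < c)) := by simp [List.countP_append]
        have h3 := hcnt c
        simp only [show c + 1 - 1 = c by ring] at *
        rw [hls, h3, h1, h2]; push_cast; ring
      have hcnt' := pvCnt_update cnt (Q ++ [c]) (c + 1) hcnt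
      have hstep : pvStepA (r, c, ls, cnt) num =
          (PySem.Int.mod (r + (ls + cnt.getD (c + 1 - 1) 0)) 1000000007, c + 1,
            ls + cnt.getD (c + 1 - 1) 0, cnt.modify (c + 1) 0 (· + 1)) := by
        simp [pvStepA, hnum]
      have hr' : PySem.Int.mod (PySem.Int.mod (r + (ls + cnt.getD (c + 1 - 1) 0)) 1000000007)
          1000000007 = PySem.Int.mod (r + (ls + cnt.getD (c + 1 - 1) 0)) 1000000007 := by
        rw [PySem.Int.mod_eq_emod_of_pos (by norm_num),
            PySem.Int.mod_eq_emod_of_pos (by norm_num)]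
        exact Int.emod_emod_of_dvd _ dvd_rfl
      have := ih (Q ++ [c]) (c + 1) _ _ _ hls' hcnt' hr'
      rw [List.foldl_cons, hstep, this]
      have hscan : pvScanFrom c (num :: l) = (c + 1) :: pvScanFrom (c + 1) l := by
        simp [pvScanFrom, hnum]
      rw [hscan]
      simp only [pvPairS, ← hls']
      simp only [PySem.Int.mod_eq_emod_of_pos (by norm_num : (0:Int) < 1000000007)]
      rw [Int.emod_add_emod]
      congr 1
      ring
    · -- step -1
      have hkey : (Q ++ [c]).countP (fun x => decide (x < c)) =
          (Q ++ [c]).countP (fun x => decide (x < c - 1)) + (Q ++ [c]).count (c - 1) := by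
        have := pvCountP_lt_succ (Q ++ [c]) (c - 1)
        simpa [show c - 1 + 1 = c by ring] using this
      have hls' : ls - cnt.getD (c - 1) 0 =
          (((Q ++ [c]).countP (fun x => decide (x < c - 1)) : Nat) : Int) := by
        have h2 : (Q ++ [c]).countP (fun x => decide (x < c)) =
            Q.countP (fun x => decide (x < c)) := by simp [List.countP_append]
        rw [hls, hcnt (c - 1)]
        have := hkey
        rw [h2] at this
        omega
      have hcnt' := pvCnt_update cnt (Q ++ [c]) (c - 1) hcnt
      have hstep : pvStepA (r, c, ls, cnt) num =
          (PySem.Int.mod (r + (ls - cnt.getD (c - 1) 0)) 1000000007, c - 1,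
            ls - cnt.getD (c - 1) 0, cnt.modify (c - 1) 0 (· + 1)) := by
        simp [pvStepA, hnum]
      have hr' : PySem.Int.mod (PySem.Int.mod (r + (ls - cnt.getD (c - 1) 0)) 1000000007)
          1000000007 = PySem.Int.mod (r + (ls - cnt.getD (c - 1) 0)) 1000000007 := by
        rw [PySem.Int.mod_eq_emod_of_pos (by norm_num),
            PySem.Int.mod_eq_emod_of_pos (by norm_num)]
        exact Int.emod_emod_of_dvd _ dvd_rfl
      have := ih (Q ++ [c]) (c - 1) _ _ _ hls' hcnt' hr'
      rw [List.foldl_cons, hstep, this]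
      have hscan : pvScanFrom c (num :: l) = (c - 1) :: pvScanFrom (c - 1) l := by
        simp [pvScanFrom, hnum, sub_eq_add_neg]
      rw [hscan]
      simp only [pvPairS, ← hls']
      simp only [PySem.Int.mod_eq_emod_of_pos (by norm_num : (0:Int) < 1000000007)]
      rw [Int.emod_add_emod]
      congr 1
      ring

-- ===== VERDICT (by name: the statement is the Claim_ definition above) =====
theorem subarraysWithMoreZerosThanOnes2_spec : Claim_equal_subarraysWithMoreZerosThanOnes2 := by
  intro nums _
  unfold Spec_subarraysWithMoreZerosThanOnes2
  have hA := pvA_loop nums [] 0 0 0 ((PySem.Dict.empty : PySem.Dict Int Int).insert 0 1)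
    (by simp) (by
      intro v
      rw [PySem.Dict.getD_insert]
      by_cases hv : v = 0 <;> simp [hv, List.count_cons]
      · intro h; exact hv h.symm) (by decide)
  have hB : subarraysWithMoreZerosThanOnes2_alt nums =
      PySem.Int.mod (pvPairS [] ([0] ++ pvScanFrom 0 nums)) 1000000007 := by
    unfold subarraysWithMoreZerosThanOnes2_alt
    rw [pvB1_spec]
    simp only [pvB2_spec]
    ring_nf
  rw [hB]
  unfold subarraysWithMoreZerosThanOnes2
  rw [hA]
  simp [pvPairS]
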